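-- pv_equiv track=rewrite | github.com/netra-systems/zen | scripts/fix_test_syntax_errors.py | fix_unclosed_parenthesis
-- ===== SOURCE A (Python) =====
-- def fix_unclosed_parenthesis(content: str) -> str:
--     """Fix unclosed parenthesis in import statements"""
--     lines = content.split('\n')
--     fixed_lines = []
--     i = 0
--
--     while i < len(lines):
--         line = lines[i]
--
--         # Check for import statements with unclosed parentheses
--         if ('from ' in line and '(' in line) or ('import ' in line and '(' in line):
--             paren_count = line.count('(') - line.count(')')
--
--             if paren_count > 0:
--                 # Found unclosed parenthesis - look for the end or close it
--                 import_lines = [line]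
--                 j = i + 1
--
--                 while j < len(lines) and paren_count > 0:
--                     next_line = lines[j]
--                     paren_count += next_line.count('(') - next_line.count(')')
--                     import_lines.append(next_line)
--                     j += 1
--
--                 # If we still have unclosed parentheses, close them
--                 if paren_count > 0:
--                     import_lines[-1] = import_lines[-1].rstrip() + ')'
--
--                 fixed_lines.extend(import_lines)
--                 i = j
--                 continue
--
--         fixed_lines.append(line)
--         i += 1
--
--     return '\n'.join(fixed_lines)
-- ===== SOURCE B (Python) =====
-- def fix_unclosed_parenthesis(content: str) -> str:
--     """Fix unclosed parenthesis in import statements (single forward pass with explicit state)."""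
--     out = []
--     buf = []        # lines of the currently open import block
--     bal = 0         # running paren balance of the open block
--     for line in content.split('\n'):
--         if buf:
--             buf.append(line)
--             bal += line.count('(') - line.count(')')
--             if bal <= 0:
--                 out.extend(buf)
--                 buf = []
--         else:
--             bal = line.count('(') - line.count(')')
--             if ('from ' in line or 'import ' in line) and '(' in line and bal > 0:
--                 buf = [line]
--             else:
--                 out.append(line)
--     if buf:
--         buf[-1] = buf[-1].rstrip() + ')'
--         out.extend(buf)
--     return '\n'.join(out)
-- ===== Notes on version B (the rewrite author's own statement) =====
-- stated objective: alternative
-- what changed: Replaces A's indexed while-loop with an inner lookahead loop (and 'continue' to skip consumed lines) by a single forward pass over the lines maintaining explicit state: an open-block buffer and a running paren balance, flushed when the balance drops to <= 0 or at EOF.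
import Mathlib
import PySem

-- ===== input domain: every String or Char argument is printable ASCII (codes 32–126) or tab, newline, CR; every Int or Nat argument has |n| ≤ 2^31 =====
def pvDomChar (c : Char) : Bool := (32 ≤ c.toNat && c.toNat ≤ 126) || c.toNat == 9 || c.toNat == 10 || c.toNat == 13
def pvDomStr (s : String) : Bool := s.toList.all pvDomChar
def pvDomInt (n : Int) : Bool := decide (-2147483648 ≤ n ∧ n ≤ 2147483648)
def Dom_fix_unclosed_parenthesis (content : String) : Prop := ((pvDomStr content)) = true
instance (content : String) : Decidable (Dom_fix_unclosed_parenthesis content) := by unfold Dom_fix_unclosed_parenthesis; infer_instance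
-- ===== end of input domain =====

-- B replaces A's nested lookahead loop by a single forward pass with explicit block state (buffer + running balance); objective: alternative decomposition, same cost.

-- line.count('(') - line.count(')')  (both Pythons compute exactly this)
def pvBal (l : String) : Int :=
  (PySem.Str.count l "(" : Int) - (PySem.Str.count l ")" : Int)

-- xs[-1] = xs[-1].rstrip() + ')'  (both Pythons perform exactly this last-element update)
def pvCloseLast : List String → List String
  | [] => []
  | [x] => [PySem.Str.rstrip x ++ ")"]
  | x :: y :: t => x :: pvCloseLast (y :: t)

-- ===== PORT A =====
-- A's inner while loop: consume lines while paren_count > 0; returns (consumed, remaining, final count)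
def aConsume : List String → Int → (List String × List String × Int)
  | [], p => ([], [], p)
  | l :: t, p =>
    if 0 < p then
      let r := aConsume t (p + pvBal l)
      (l :: r.1, r.2.1, r.2.2)
    else ([], l :: t, p)

theorem aConsume_rest_len (t : List String) (p : Int) :
    (aConsume t p).2.1.length ≤ t.length := by
  induction t generalizing p with
  | nil => simp [aConsume]
  | cons l t ih =>
    simp only [aConsume]
    split
    · exact le_trans (ih _) (Nat.le_succ _)
    · simp

-- A's outer while loop over the lines
def aGo : List String → List String
  | [] => []
  | l :: t =>
    if (PySem.Str.isIn "from " l && PySem.Str.isIn "(" l) ||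
       (PySem.Str.isIn "import " l && PySem.Str.isIn "(" l) then
      if 0 < pvBal l then
        (if 0 < (aConsume t (pvBal l)).2.2 then pvCloseLast (l :: (aConsume t (pvBal l)).1)
         else l :: (aConsume t (pvBal l)).1) ++ aGo (aConsume t (pvBal l)).2.1
      else l :: aGo t
    else l :: aGo t
termination_by ls => ls.length
decreasing_by
  · exact Nat.lt_succ_of_le (aConsume_rest_len t _)
  · simp
  · simp

def fix_unclosed_parenthesis (content : String) : String :=
  PySem.Str.join "\n" (aGo ((PySem.Str.split? content "\n").getD []))

-- ===== PORT B =====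
-- one step of B's single forward pass; state = (output lines, open block buffer, running balance)
def bStep (st : List String × List String × Int) (line : String) :
    List String × List String × Int :=
  if !st.2.1.isEmpty then
    let bal := st.2.2 + pvBal line
    if bal ≤ 0 then (st.1 ++ (st.2.1 ++ [line]), [], bal)
    else (st.1, st.2.1 ++ [line], bal)
  else
    if ((PySem.Str.isIn "from " line || PySem.Str.isIn "import " line) &&
        PySem.Str.isIn "(" line) && decide (0 < pvBal line) then
      (st.1, [line], pvBal line)
    else (st.1 ++ [line], [], pvBal line)

-- B's post-loop flush: close the still-open block, if any
def bFinish (st : List String × List String × Int) : List String :=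
  if st.2.1.isEmpty then st.1 else st.1 ++ pvCloseLast st.2.1

def fix_unclosed_parenthesis_alt (content : String) : String :=
  PySem.Str.join "\n"
    (bFinish (((PySem.Str.split? content "\n").getD []).foldl bStep ([], [], 0)))

-- ===== PRECONDITION & SPEC =====
def Spec_fix_unclosed_parenthesis (content : String) (out : String) : Prop := out = fix_unclosed_parenthesis_alt content
instance (content : String) (out : String) : Decidable (Spec_fix_unclosed_parenthesis content out) := by unfold Spec_fix_unclosed_parenthesis; infer_instance

-- ===== CLAIM (what is proved, stated in full; the proofs are below) =====
def Claim_equal_fix_unclosed_parenthesis : Prop := ∀ (content : String), Dom_fix_unclosed_parenthesis content → Spec_fix_unclosed_parenthesis content (fix_unclosed_parenthesis content)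

-- ===== LEMMAS AND PROOFS =====

theorem bStep_closed (out : List String) (bal : Int) (l : String) :
    bStep (out, [], bal) l =
      if ((PySem.Str.isIn "from " l || PySem.Str.isIn "import " l) &&
          PySem.Str.isIn "(" l) && decide (0 < pvBal l) then (out, [l], pvBal l)
      else (out ++ [l], [], pvBal l) := rfl

theorem bStep_open (out : List String) (b0 : String) (bs : List String) (bal : Int) (l : String) :
    bStep (out, b0 :: bs, bal) l =
      if bal + pvBal l ≤ 0 then (out ++ ((b0 :: bs) ++ [l]), [], bal + pvBal l)
      else (out, (b0 :: bs) ++ [l], bal + pvBal l) := rfl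

theorem aGo_cons (l : String) (t : List String) :
    aGo (l :: t) =
      if (PySem.Str.isIn "from " l && PySem.Str.isIn "(" l) ||
         (PySem.Str.isIn "import " l && PySem.Str.isIn "(" l) then
        if 0 < pvBal l then
          (if 0 < (aConsume t (pvBal l)).2.2 then pvCloseLast (l :: (aConsume t (pvBal l)).1)
           else l :: (aConsume t (pvBal l)).1) ++ aGo (aConsume t (pvBal l)).2.1
        else l :: aGo t
      else l :: aGo t := by
  rw [aGo]

theorem aConsume_nonpos (t : List String) (p : Int) (h : p ≤ 0) :
    aConsume t p = ([], t, p) := by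
  cases t with
  | nil => simp [aConsume]
  | cons l t => simp [aConsume, not_lt.mpr h]

-- the two versions' import tests are the same Boolean
theorem cond_eq (a b c : Bool) : ((a || b) && c) = ((a && c) || (b && c)) := by
  cases a <;> cases b <;> cases c <;> rfl

-- while in an open block, B's fold tracks A's inner consume loop
theorem open_lemma (rest : List String) (out : List String) (b0 : String) (bs : List String) (bal : Int)
    (hb : 0 < bal) :
    (0 < (aConsume rest bal).2.2 →
      rest.foldl bStep (out, b0 :: bs, bal)
        = (out, (b0 :: bs) ++ (aConsume rest bal).1, (aConsume rest bal).2.2)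
      ∧ (aConsume rest bal).2.1 = []) ∧
    (¬ 0 < (aConsume rest bal).2.2 →
      rest.foldl bStep (out, b0 :: bs, bal) =
        (aConsume rest bal).2.1.foldl bStep
          (out ++ ((b0 :: bs) ++ (aConsume rest bal).1), [], (aConsume rest bal).2.2)) := by
  induction rest generalizing out b0 bs bal with
  | nil =>
    constructor
    · intro _; simp [aConsume]
    · intro h; exact absurd (by simpa [aConsume] using hb) h
  | cons l t ih =>
    simp only [aConsume, if_pos hb, List.foldl_cons, bStep_open]
    by_cases hle : bal + pvBal l ≤ 0
    · have hcons : aConsume t (bal + pvBal l) = ([], t, bal + pvBal l) :=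
        aConsume_nonpos t _ hle
      constructor
      · intro hpos
        exact absurd (by simpa [hcons] using hpos) (not_lt.mpr hle)
      · intro _
        simp [hcons, if_pos hle]
    · have hb' : 0 < bal + pvBal l := by omega
      have ih' := ih out b0 (bs ++ [l]) (bal + pvBal l) hb'
      rw [if_neg hle]
      constructor
      · intro hpos
        have h := ih'.1 (by simpa using hpos)
        refine ⟨?_, by simpa using h.2⟩
        rw [show (b0 :: (bs ++ [l]) : List String) = (b0 :: bs) ++ [l] from by simp] at h
        rw [h.1]; simp
      · intro hnpos
        have h := ih'.2 (by simpa using hnpos)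
        rw [show (b0 :: (bs ++ [l]) : List String) = (b0 :: bs) ++ [l] from by simp] at h
        rw [h]; simp

-- main invariant: from a closed state, B's fold+flush produces A's output appended to out
theorem main_lemma (n : Nat) : ∀ (lines : List String), lines.length ≤ n →
    ∀ (out : List String) (bal : Int),
      bFinish (lines.foldl bStep (out, [], bal)) = out ++ aGo lines := by
  induction n with
  | zero =>
    intro lines hlen out bal
    have : lines = [] := List.eq_nil_of_length_eq_zero (Nat.le_zero.mp hlen)
    subst this
    simp [bFinish, aGo]
  | succ m ih =>
    intro lines hlen out bal
    cases lines with
    | nil => simp [bFinish, aGo]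
    | cons l t =>
      have hlt : t.length ≤ m := by simpa using hlen
      simp only [List.foldl_cons, bStep_closed]
      by_cases h1 : ((PySem.Str.isIn "from " l || PySem.Str.isIn "import " l) &&
          PySem.Str.isIn "(" l) = true
      · by_cases h2 : 0 < pvBal l
        · -- a block opens here
          rw [if_pos (by rw [h1, decide_eq_true h2]; rfl)]
          have hA : ((PySem.Str.isIn "from " l && PySem.Str.isIn "(" l) ||
              (PySem.Str.isIn "import " l && PySem.Str.isIn "(" l)) = true := by
            rw [← cond_eq]; exact h1
          rw [aGo_cons, if_pos hA, if_pos h2]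
          have hopen := open_lemma t out l [] (pvBal l) h2
          by_cases hpos : 0 < (aConsume t (pvBal l)).2.2
          · obtain ⟨heq, hrem⟩ := hopen.1 hpos
            rw [heq, hrem, if_pos hpos]
            have : aGo [] = [] := by rw [aGo]
            rw [this]
            simp only [bFinish]
            cases h : (aConsume t (pvBal l)).1 <;>
              simp [pvCloseLast]
          · rw [hopen.2 hpos, if_neg hpos]
            have hrlen : (aConsume t (pvBal l)).2.1.length ≤ m :=
              le_trans (aConsume_rest_len t _) hlt
            rw [ih _ hrlen]
            simp
        · -- import-looking line but balanced: no block
          rw [if_neg (by rw [h1, decide_eq_false h2]; exact Bool.false_ne_true)]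
          rw [ih t hlt]
          have hA : ((PySem.Str.isIn "from " l && PySem.Str.isIn "(" l) ||
              (PySem.Str.isIn "import " l && PySem.Str.isIn "(" l)) = true := by
            rw [← cond_eq]; exact h1
          rw [aGo_cons, if_pos hA, if_neg h2]
          simp
      · -- not an import line with '('
        rw [if_neg (by
          intro h
          exact h1 (by
            cases hx : ((PySem.Str.isIn "from " l || PySem.Str.isIn "import " l) &&
                PySem.Str.isIn "(" l) with
            | true => rfl
            | false => rw [hx] at h; exact absurd h (by simp)))]
        rw [ih t hlt]
        have hA : ((PySem.Str.isIn "from " l && PySem.Str.isIn "(" l) ||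
            (PySem.Str.isIn "import " l && PySem.Str.isIn "(" l)) = false := by
          rw [← cond_eq]; exact Bool.not_eq_true _ ▸ (Bool.eq_false_iff.mpr (fun hx => h1 hx))
        rw [aGo_cons, if_neg (by rw [hA]; exact Bool.false_ne_true)]
        simp

-- ===== VERDICT (by name: the statement is the Claim_ definition above) =====
theorem fix_unclosed_parenthesis_spec : Claim_equal_fix_unclosed_parenthesis := by
  intro content _
  unfold Spec_fix_unclosed_parenthesis fix_unclosed_parenthesis fix_unclosed_parenthesis_alt
  rw [main_lemma ((PySem.Str.split? content "\n").getD []).length _ le_rfl [] 0]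
  simp
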